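-- pv_equiv track=rewrite | github.com/ETS2K7/ClippedAI | pipeline/render.py | _build_time_expr
-- ===== SOURCE A (Python) =====
-- def _build_time_expr(segments: list[dict], key: str, default: int) -> str:
--     """
--     Build FFmpeg expression: if(between(t,t0,t1),val0,if(between(t,t1,t2),val1,...))
--     Limits nesting depth to avoid FFmpeg expression parser limits (~100 levels).
--     For very long clips: subsample segments to stay under the limit.
--     """
--     MAX_NESTING = 80  # FFmpeg expression parser limit
--
--     segs = segments
--     if len(segs) > MAX_NESTING:
--         # Subsample: pick evenly spaced segments
--         step = len(segs) / MAX_NESTING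
--         segs = [segs[int(i * step)] for i in range(MAX_NESTING)]
--
--     # Build from the inside out (last segment = default)
--     expr = str(default)
--     for s in reversed(segs):
--         expr = f"if(between(t\\,{s['t_start']}\\,{s['t_end']})\\,{s[key]}\\,{expr})"
--
--     return expr
-- ===== SOURCE B (Python) =====
-- def _build_time_expr(segments: list[dict], key: str, default: int) -> str:
--     MAX_NESTING = 80  # FFmpeg expression parser limit
--
--     if len(segments) <= MAX_NESTING:
--         segs = segments
--     else:
--         # Subsample: pick evenly spaced segments, one at a time
--         step = len(segments) / MAX_NESTING
--         segs = []
--         for i in range(MAX_NESTING):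
--             segs.append(segments[int(i * step)])
--
--     # Flat construction: emit every if-prefix left to right, then the default,
--     # then one closing paren per segment.
--     prefixes = [
--         f"if(between(t\\,{s['t_start']}\\,{s['t_end']})\\,{s[key]}\\,"
--         for s in segs
--     ]
--     return "".join(prefixes) + str(default) + ")" * len(segs)
-- ===== Notes on version B (the rewrite author's own statement) =====
-- stated objective: alternative
-- what changed: The inside-out reversed-accumulator loop that nests the expression is replaced by a flat construction: one forward pass joining all if-prefixes, then the default, then one closing paren per segment.
import Mathlib
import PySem

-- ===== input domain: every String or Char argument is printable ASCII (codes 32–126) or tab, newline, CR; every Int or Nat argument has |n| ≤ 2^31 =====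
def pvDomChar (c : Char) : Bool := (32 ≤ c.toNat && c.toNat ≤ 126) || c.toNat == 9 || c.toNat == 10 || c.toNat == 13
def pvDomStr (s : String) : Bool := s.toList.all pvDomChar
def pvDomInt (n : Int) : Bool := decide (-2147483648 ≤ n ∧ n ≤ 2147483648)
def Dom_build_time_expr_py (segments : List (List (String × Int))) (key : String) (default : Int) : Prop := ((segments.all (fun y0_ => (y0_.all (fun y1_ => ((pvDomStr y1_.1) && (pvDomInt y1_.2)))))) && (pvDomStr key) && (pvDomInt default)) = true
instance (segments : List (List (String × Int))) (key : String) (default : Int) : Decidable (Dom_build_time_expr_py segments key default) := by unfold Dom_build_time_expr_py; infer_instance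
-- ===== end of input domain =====

-- B replaces the inside-out reversed-fold nesting by a flat left-to-right construction: all if-prefixes, then the default, then one ')' per segment (objective: alternative decomposition; same cost). Return value only; neither version mutates its arguments.

-- ===== PORT A =====
-- A-side helpers: exact IEEE-double emulation of `int(i * (len/80))` (binary64 round-to-nearest-even), integers only
-- round-half-to-even of num/den (den > 0)
def pvRHEA (num den : Nat) : Nat :=
  let q := num / den
  let r := num % den
  if den < 2 * r then q + 1 else if 2 * r < den then q else q + q % 2

-- round the rational a/b (with a ≥ b > 0) to the nearest binary64: value m * 2^e, 2^52 ≤ m < 2^53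
def pvRoundA (a b : Nat) : Nat × Int :=
  let t := Nat.log2 (a / b)
  let e : Int := (t : Int) - 52
  let m := if t ≤ 52 then pvRHEA (a <<< (52 - t)) b else pvRHEA a (b <<< (t - 52))
  if m == 2 ^ 53 then (2 ^ 52, e + 1) else (m, e)

-- exact value of Python's `int(i * (n/80))` for 0 ≤ i < 80, n > 80 (both factors fit binary64 exactly)
def pvIdxA (i n : Nat) : Nat :=
  if i == 0 then 0
  else
    let p := pvRoundA n 80          -- step = n/80 rounded to double
    let M := i * p.1               -- exact product; re-round to 53 bits
    let t := Nat.log2 M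
    let q : Nat × Int :=
      if 52 < t then
        let sh := t - 52
        let M' := pvRHEA M (1 <<< sh)
        if M' == 2 ^ 53 then (2 ^ 52, p.2 + sh + 1) else (M', p.2 + (sh : Int))
      else (M, p.2)
    if 0 ≤ q.2 then q.1 <<< q.2.toNat else q.1 >>> (-q.2).toNat

-- dict lookup s[k] (first match); total form with default 0, used only under Pre_ (key present)
def pvLookA (s : List (String × Int)) (k : String) : Int := (s.lookup k).getD 0

def build_time_expr_py (segments : List (List (String × Int))) (key : String) (default : Int) : String :=
  let segs :=
    if 80 < segments.length then
      (List.range 80).map (fun i => segments.getD (pvIdxA i segments.length) [])  -- index provably < length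
    else segments
  segs.reverse.foldl
    (fun expr s =>
      "if(between(t\\," ++ PySem.Int.toStr (pvLookA s "t_start") ++ "\\," ++
        PySem.Int.toStr (pvLookA s "t_end") ++ ")\\," ++ PySem.Int.toStr (pvLookA s key) ++
        "\\," ++ expr ++ ")")
    (PySem.Int.toStr default)

-- ===== PORT B =====
-- B-side helpers: B keeps the identical float subsample prelude, emulated here in its own decomposition
-- (the same binary64 arithmetic, written as round-half-up-with-even-tie-fix, normalise-to-53-bits, floor-by-shift)
-- round num/den half to even, for EVEN den: round half up, step back on an odd tie
def pvRne (num den : Nat) : Nat :=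
  let r := (num + den / 2) / den
  if num % den == den / 2 && r % 2 == 1 then r - 1 else r

-- carry a rounded mantissa that overflowed 53 bits into the exponent
def pvCarry (m : Nat) (e : Int) : Nat × Int :=
  if m = 2 ^ 53 then (2 ^ 52, e + 1) else (m, e)

-- mantissa and exponent of the binary64 nearest to n/80 (n > 80)
def pvStepB (n : Nat) : Nat × Int :=
  pvCarry (if Nat.log2 (n / 80) ≤ 52 then pvRne (n <<< (52 - Nat.log2 (n / 80))) 80
           else pvRne n (80 <<< (Nat.log2 (n / 80) - 52)))
          ((Nat.log2 (n / 80) : Int) - 52)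

-- re-round an exact product mantissa to at most 53 bits
def pvNorm53 (M : Nat) (e : Int) : Nat × Int :=
  if Nat.log2 M ≤ 52 then (M, e)
  else pvCarry (pvRne M (1 <<< (Nat.log2 M - 52))) (e + (Nat.log2 M - 52 : Nat))

-- floor(m * 2^e)
def pvFloor2 (m : Nat) : Int → Nat
  | .ofNat k => m <<< k
  | .negSucc k => m >>> (k + 1)

-- Python's int(i * (n/80)), B's decomposition
def pvIdxB (i n : Nat) : Nat :=
  match i, pvStepB n with
  | 0, _ => 0
  | _, (m, e) =>
      match pvNorm53 (i * m) e with
      | (m', e') => pvFloor2 m' e'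

-- the subsampled list, built by appending one picked segment at a time (Python B's explicit loop)
def pvSampleB (segments : List (List (String × Int))) : Nat → List (List (String × Int))
  | 0 => []
  | k + 1 => pvSampleB segments k ++ [segments.getD (pvIdxB k segments.length) []]

def build_time_expr_py_alt (segments : List (List (String × Int))) (key : String) (default : Int) : String :=
  let segs := if segments.length ≤ 80 then segments else pvSampleB segments 80
  -- '' .join of the prefixes, then str(default), then ")" * len(segs) (built as a joined replicate)
  String.join (segs.map (fun s =>
    "if(between(t\\," ++ PySem.Int.toStr ((s.lookup "t_start").getD 0) ++ "\\," ++
      PySem.Int.toStr ((s.lookup "t_end").getD 0) ++ ")\\," ++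
      PySem.Int.toStr ((s.lookup key).getD 0) ++ "\\,"))
  ++ PySem.Int.toStr default ++ String.join (List.replicate segs.length ")")

-- ===== PRECONDITION & SPEC =====
-- Pre_-side copy of the subsample index (identical arithmetic; duplicated so Pre_'s closure stays off the ports)
def pvRHEP (num den : Nat) : Nat :=
  let q := num / den
  let r := num % den
  if den < 2 * r then q + 1 else if 2 * r < den then q else q + q % 2

def pvRoundP (a b : Nat) : Nat × Int :=
  let t := Nat.log2 (a / b)
  let e : Int := (t : Int) - 52
  let m := if t ≤ 52 then pvRHEP (a <<< (52 - t)) b else pvRHEP a (b <<< (t - 52))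
  if m == 2 ^ 53 then (2 ^ 52, e + 1) else (m, e)

def pvIdxP (i n : Nat) : Nat :=
  if i == 0 then 0
  else
    let p := pvRoundP n 80
    let M := i * p.1
    let t := Nat.log2 M
    let q : Nat × Int :=
      if 52 < t then
        let sh := t - 52
        let M' := pvRHEP M (1 <<< sh)
        if M' == 2 ^ 53 then (2 ^ 52, p.2 + sh + 1) else (M', p.2 + (sh : Int))
      else (M, p.2)
    if 0 ≤ q.2 then q.1 <<< q.2.toNat else q.1 >>> (-q.2).toNat

-- a segment has the keys Python reads: 't_start', 't_end' and `key` (else A raises KeyError)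
def pvKeysOk (key : String) (s : List (String × Int)) : Bool :=
  (s.lookup "t_start").isSome && (s.lookup "t_end").isSome && (s.lookup key).isSome

-- Pre_: exactly the inputs on which A returns — every segment Python actually reads has the three
-- keys (all of them when len ≤ 80, only the 80 subsampled ones when len > 80).
def Pre_build_time_expr_py (segments : List (List (String × Int))) (key : String) (default : Int) : Prop :=
  (if 80 < segments.length then
      (List.range 80).all (fun i => pvKeysOk key (segments.getD (pvIdxP i segments.length) []))
    else segments.all (pvKeysOk key)) = true

instance (segments : List (List (String × Int))) (key : String) (default : Int) : Decidable (Pre_build_time_expr_py segments key default) := by unfold Pre_build_time_expr_py; infer_instance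

def pvWitness_build_time_expr_py : (List (List (String × Int))) × String × Int :=
  ([[("t_start", 0), ("t_end", 1), ("v", 2)], [("t_start", 1), ("t_end", 3), ("v", 4)]], "v", 7)

def Spec_build_time_expr_py (segments : List (List (String × Int))) (key : String) (default : Int) (out : String) : Prop := out = build_time_expr_py_alt segments key default
instance (segments : List (List (String × Int))) (key : String) (default : Int) (out : String) : Decidable (Spec_build_time_expr_py segments key default out) := by unfold Spec_build_time_expr_py; infer_instance

-- ===== CLAIM (what is proved, stated in full; the proofs are below) =====
def Claim_equal_build_time_expr_py : Prop := ∀ (segments : List (List (String × Int))) (key : String) (default : Int), Dom_build_time_expr_py segments key default → Pre_build_time_expr_py segments key default → Spec_build_time_expr_py segments key default (build_time_expr_py segments key default)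

-- ===== LEMMAS AND PROOFS =====


-- B's half-up-with-tie-fix rounding equals A's direct round-half-to-even, for even positive den
theorem pvRne_eq (num den : Nat) (hd : 0 < den) (he : den % 2 = 0) :
    pvRne num den = pvRHEA num den := by
  obtain ⟨h, rfl⟩ : ∃ h, den = 2 * h := ⟨den / 2, by omega⟩
  have hh : 0 < h := by omega
  unfold pvRne pvRHEA
  have hr : num % (2 * h) < 2 * h := Nat.mod_lt _ (by omega)
  have hhalf : (2 * h) / 2 = h := by omega
  have hq := Nat.div_add_mod num (2 * h)
  have hdiv : (num + h) / (2 * h) = num / (2 * h) + (num % (2 * h) + h) / (2 * h) := by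
    rw [show num + h = (2 * h) * (num / (2 * h)) + (num % (2 * h) + h)
          by omega,
      Nat.mul_add_div (by omega)]
  rw [hhalf]
  rcases Nat.lt_trichotomy (num % (2 * h)) h with hc | hc | hc
  · have h2 : (num % (2 * h) + h) / (2 * h) = 0 := Nat.div_eq_of_lt (by omega)
    have h1 : (num + h) / (2 * h) = num / (2 * h) := by rw [hdiv, h2]; simp
    rw [h1]
    simp only [beq_iff_eq, Bool.and_eq_true]
    clear hq hdiv h2 h1
    generalize num / (2 * h) = q at *
    generalize num % (2 * h) = r at *
    split_ifs <;> omega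
  · have h2 : (num % (2 * h) + h) / (2 * h) = 1 :=
      Nat.div_eq_of_lt_le (k := 1) (by omega) (by omega)
    have h1 : (num + h) / (2 * h) = num / (2 * h) + 1 := by rw [hdiv, h2]
    rw [h1]
    simp only [beq_iff_eq, Bool.and_eq_true]
    clear hq hdiv h2 h1
    generalize num / (2 * h) = q at *
    generalize num % (2 * h) = r at *
    split_ifs <;> omega
  · have h2 : (num % (2 * h) + h) / (2 * h) = 1 :=
      Nat.div_eq_of_lt_le (k := 1) (by omega) (by omega)
    have h1 : (num + h) / (2 * h) = num / (2 * h) + 1 := by rw [hdiv, h2]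
    rw [h1]
    simp only [beq_iff_eq, Bool.and_eq_true]
    clear hq hdiv h2 h1
    generalize num / (2 * h) = q at *
    generalize num % (2 * h) = r at *
    split_ifs <;> omega

-- a positive even base stays positive and even after a left shift
theorem pvShiftEven (b k : Nat) (hb : 0 < b) (he : b % 2 = 0) :
    0 < b <<< k ∧ (b <<< k) % 2 = 0 := by
  rw [Nat.shiftLeft_eq]
  constructor
  · positivity
  · rw [Nat.mul_mod, he]; simp

-- B's step = A's rounding of n/80
theorem pvStepB_eq (n : Nat) : pvStepB n = pvRoundA n 80 := by
  simp only [pvStepB, pvRoundA, pvCarry, beq_iff_eq]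
  rw [pvRne_eq _ 80 (by norm_num) (by norm_num),
      pvRne_eq n (80 <<< (Nat.log2 (n / 80) - 52)) (pvShiftEven 80 _ (by norm_num) (by norm_num)).1
        (pvShiftEven 80 _ (by norm_num) (by norm_num)).2]

-- B's constructor-case floor = A's sign-tested shift
theorem pvFloor2_eq (m : Nat) (e : Int) :
    pvFloor2 m e = if 0 ≤ e then m <<< e.toNat else m >>> (-e).toNat := by
  cases e with
  | ofNat k => simp [pvFloor2]
  | negSucc k => simp [pvFloor2]

-- B's index = A's index
theorem pvIdxB_eq (i n : Nat) : pvIdxB i n = pvIdxA i n := by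
  cases i with
  | zero => simp [pvIdxB, pvIdxA]
  | succ k =>
      rcases hp : pvRoundA n 80 with ⟨m, e⟩
      simp only [pvIdxB, pvIdxA, pvStepB_eq, pvNorm53, pvCarry, pvFloor2_eq, hp, beq_iff_eq,
        Nat.succ_ne_zero, if_false]
      set t := Nat.log2 ((k + 1) * m) with ht
      by_cases h52 : t ≤ 52
      · rw [if_pos h52, if_neg (show ¬ 52 < t by omega)]
      · rw [if_neg h52, if_pos (show 52 < t by omega)]
        rw [pvRne_eq _ _ (by rw [Nat.shiftLeft_eq]; positivity)
              (by rw [Nat.shiftLeft_eq, Nat.one_mul, Nat.pow_mod]; simp [show t - 52 ≠ 0 by omega])]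

-- folding String.append from an arbitrary seed factors through the empty seed
theorem pvJoinFold (s : String) (l : List String) :
    List.foldl (fun r t => r ++ t) s l = s ++ List.foldl (fun r t => r ++ t) "" l := by
  induction l generalizing s with
  | nil => simp
  | cons x xs ih =>
      simp only [List.foldl]
      rw [ih (s ++ x), ih (_ ++ x), String.empty_append, String.append_assoc]

theorem pvJoinCons (s : String) (l : List String) :
    String.join (s :: l) = s ++ String.join l := by
  simp [String.join]; rw [pvJoinFold]

-- a run of identical one-char strings commutes with one more copy
theorem pvRepSwap (n : Nat) :
    String.join (List.replicate n ")") ++ ")" = ")" ++ String.join (List.replicate n ")") := by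
  induction n with
  | zero => simp [String.join]
  | succ n ih => rw [List.replicate_succ, pvJoinCons, String.append_assoc, ih]

-- B's appending sampler = the range-map A uses
theorem pvSampleB_eq (segments : List (List (String × Int))) (n : Nat) :
    pvSampleB segments n
      = (List.range n).map (fun i => segments.getD (pvIdxA i segments.length) []) := by
  induction n with
  | zero => rfl
  | succ k ih =>
      rw [List.range_succ, List.map_append, pvSampleB, ih, pvIdxB_eq]
      rfl

-- A's reversed fold = B's flat concatenation
theorem pv_fold_eq_flat (key : String) (default : Int) (l : List (List (String × Int))) :
    l.reverse.foldl
      (fun expr s =>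
        "if(between(t\\," ++ PySem.Int.toStr (pvLookA s "t_start") ++ "\\," ++
          PySem.Int.toStr (pvLookA s "t_end") ++ ")\\," ++ PySem.Int.toStr (pvLookA s key) ++
          "\\," ++ expr ++ ")")
      (PySem.Int.toStr default)
    = String.join (l.map (fun s =>
        "if(between(t\\," ++ PySem.Int.toStr ((s.lookup "t_start").getD 0) ++ "\\," ++
          PySem.Int.toStr ((s.lookup "t_end").getD 0) ++ ")\\," ++
          PySem.Int.toStr ((s.lookup key).getD 0) ++ "\\,"))
      ++ PySem.Int.toStr default ++ String.join (List.replicate l.length ")") := by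
  induction l with
  | nil => simp [String.join]
  | cons s t ih =>
      rw [List.reverse_cons, List.foldl_append, ih]
      simp only [List.foldl, List.map, pvJoinCons, List.length_cons, List.replicate_succ, pvLookA]
      simp [String.append_assoc, ← pvRepSwap]

-- ===== VERDICT (by name: the statement is the Claim_ definition above) =====
theorem build_time_expr_py_spec : Claim_equal_build_time_expr_py := by
  intro segments key default _ _
  unfold Spec_build_time_expr_py build_time_expr_py build_time_expr_py_alt
  by_cases h : 80 < segments.length
  · rw [if_pos h, if_neg (show ¬ segments.length ≤ 80 by omega), pvSampleB_eq]
    exact pv_fold_eq_flat key default _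
  · rw [if_neg h, if_pos (show segments.length ≤ 80 by omega)]
    exact pv_fold_eq_flat key default _
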